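-- pv_equiv track=rewrite | github.com/rconnorjohnstone/cade | api/code/app/routes.py | donutify
-- ===== SOURCE A (Python) =====
-- def donutify(message_list):
--     i = 0
--     donut_list = []
--     for word in message_list:
--         if i%2 == 1:
--             donut_list.append("donut")
--         else:
--             donut_list.append(word)
--         i += 1
--     return donut_list
-- ===== SOURCE B (Python) =====
-- def donutify(message_list):
--     out = []
--     n = len(message_list)
--     k = 0
--     while k + 1 < n:
--         out += [message_list[k], "donut"]
--         k += 2
--     if k < n:
--         out.append(message_list[k])
--     return out
-- ===== Notes on version B (the rewrite author's own statement) =====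
-- stated objective: alternative
-- what changed: Replaces A's element-wise loop with a running counter and an index-parity branch by a stride-2 index loop that emits each kept element together with its 'donut' replacement in one step, so no parity test exists at all.
import Mathlib
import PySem

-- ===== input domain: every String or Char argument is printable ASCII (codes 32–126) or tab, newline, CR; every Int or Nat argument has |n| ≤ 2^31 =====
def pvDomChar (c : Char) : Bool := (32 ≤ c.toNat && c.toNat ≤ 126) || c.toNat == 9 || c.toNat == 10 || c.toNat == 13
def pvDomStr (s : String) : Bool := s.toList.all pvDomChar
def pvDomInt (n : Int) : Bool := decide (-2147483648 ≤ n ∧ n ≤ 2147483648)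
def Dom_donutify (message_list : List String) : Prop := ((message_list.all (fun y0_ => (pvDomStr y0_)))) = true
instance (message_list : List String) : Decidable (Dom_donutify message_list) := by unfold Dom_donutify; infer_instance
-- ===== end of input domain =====

-- B replaces A's counter loop with an index-parity branch by a stride-2 index loop emitting pairs (alternative decomposition; same cost).

-- ===== PORT A =====
-- i = 0; donut_list = []; for word: append "donut" if i%2==1 else word; i += 1
def donutify (message_list : List String) : List String :=
  (message_list.foldl
    (fun (st : Int × List String) word =>
      (st.1 + 1,
        if PySem.Int.mod st.1 2 == 1 then st.2 ++ ["donut"] else st.2 ++ [word]))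
    (0, [])).2

-- ===== PORT B =====
-- while k + 1 < n: out += [ml[k], "donut"]; k += 2;  then if k < n: out.append(ml[k])
-- (ml[k] is ported with pyGetD; the loop only reads indices 0 ≤ k < n, where it equals Python's ml[k])
def donutifyAltLoop (ml : List String) (n : Int) (k : Int) (out : List String) : List String :=
  if _h : k + 1 < n then
    donutifyAltLoop ml n (k + 2) (out ++ [PySem.List.pyGetD ml k "", "donut"])
  else if k < n then out ++ [PySem.List.pyGetD ml k ""]
  else out
termination_by (n - k).toNat
decreasing_by omega

def donutify_alt (message_list : List String) : List String :=
  donutifyAltLoop message_list (message_list.length : Int) 0 []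

-- ===== PRECONDITION & SPEC =====
def Spec_donutify (message_list : List String) (out : List String) : Prop := out = donutify_alt message_list
instance (message_list : List String) (out : List String) : Decidable (Spec_donutify message_list out) := by unfold Spec_donutify; infer_instance

-- ===== CLAIM (what is proved, stated in full; the proofs are below) =====
def Claim_equal_donutify : Prop := ∀ (message_list : List String), Dom_donutify message_list → Spec_donutify message_list (donutify message_list)

-- ===== LEMMAS AND PROOFS =====

-- A's output starting from parity flag b (b = "current index is odd")
def donutG (b : Bool) : List String → List String
  | [] => []
  | w :: t => (if b then "donut" else w) :: donutG (!b) t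

theorem parity_flip (i : Int) :
    (PySem.Int.mod (i + 1) 2 == 1) = !(PySem.Int.mod i 2 == 1) := by
  rw [PySem.Int.mod_eq_emod_of_pos (by omega), PySem.Int.mod_eq_emod_of_pos (by omega)]
  rcases Int.emod_two_eq i with h | h
  · have h1 : (i + 1) % 2 = 1 := by omega
    simp [h, h1]
  · have h1 : (i + 1) % 2 = 0 := by omega
    simp [h, h1]

theorem donutify_loop (xs : List String) : ∀ (i : Int) (acc : List String),
    (xs.foldl
      (fun (st : Int × List String) word =>
        (st.1 + 1,
          if PySem.Int.mod st.1 2 == 1 then st.2 ++ ["donut"] else st.2 ++ [word]))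
      (i, acc)).2 = acc ++ donutG (PySem.Int.mod i 2 == 1) xs := by
  induction xs with
  | nil => intro i acc; simp [donutG]
  | cons w t ih =>
    intro i acc
    simp only [List.foldl_cons, donutG]
    rw [ih, parity_flip]
    split_ifs <;> simp

theorem donutG_two_cons (a b : String) (t : List String) :
    donutG false (a :: b :: t) = a :: "donut" :: donutG false t := by
  simp [donutG]

theorem altLoop_eq (ml : List String) : ∀ (k : Int) (out : List String), 0 ≤ k →
    donutifyAltLoop ml (ml.length : Int) k out = out ++ donutG false (ml.drop k.toNat) := by
  intro k out hk
  induction k, out using donutifyAltLoop.induct ml (ml.length : Int) with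
  | case1 k out h ih =>
    have hk2 : k.toNat + 1 < ml.length := by omega
    have hd1 : ml.drop k.toNat = ml[k.toNat] :: ml.drop (k.toNat + 1) :=
      List.drop_eq_getElem_cons (by omega)
    have hd2 : ml.drop (k.toNat + 1) = ml[k.toNat + 1] :: ml.drop (k.toNat + 2) :=
      List.drop_eq_getElem_cons (by omega)
    rw [donutifyAltLoop]
    simp only [h, dif_pos]
    rw [ih (by omega), hd1, hd2, donutG_two_cons]
    have hget : PySem.List.pyGetD ml k "" = ml[k.toNat] := by
      rw [PySem.List.pyGetD_eq_getElem ml "" hk (by omega)]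
    have hkn : (k + 2).toNat = k.toNat + 2 := by omega
    simp [hget, hkn]
  | case2 k out h1 h2 =>
    have hd1 : ml.drop k.toNat = ml[k.toNat] :: ml.drop (k.toNat + 1) :=
      List.drop_eq_getElem_cons (by omega)
    have hd2 : ml.drop (k.toNat + 1) = [] := List.drop_eq_nil_of_le (by omega)
    rw [donutifyAltLoop]
    simp only [h1, dif_neg, h2, if_pos, not_false_iff]
    have hget : PySem.List.pyGetD ml k "" = ml[k.toNat] := by
      rw [PySem.List.pyGetD_eq_getElem ml "" hk (by omega)]
    simp [hd1, hd2, hget, donutG]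
  | case3 k out h1 h2 =>
    have hd : ml.drop k.toNat = [] := List.drop_eq_nil_of_le (by omega)
    rw [donutifyAltLoop]
    simp [h1, h2, hd, donutG]

-- ===== VERDICT (by name: the statement is the Claim_ definition above) =====
theorem donutify_spec : Claim_equal_donutify := by
  intro ml _
  unfold Spec_donutify donutify donutify_alt
  rw [donutify_loop, altLoop_eq ml 0 [] le_rfl]
  simp [PySem.Int.mod]
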